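-- pv_equiv track=rewrite | github.com/akash99955/PalmMind | app/services/ingestion_service.py | _chunk_recursive
-- ===== SOURCE A (Python) =====
-- def _chunk_recursive(text: str, target_size=500) -> list[str]:
--     # Simple recursive implementation
--     separators = ["\n\n", "\n", ". ", " ", ""]
--     final_chunks = []
--
--     def split(text, separators, current_size):
--         if len(text) <= current_size:
--             final_chunks.append(text)
--             return
--
--         # If no separators left, just hard slice
--         if not separators:
--             final_chunks.extend([text[i:i+current_size] for i in range(0, len(text), current_size)])
--             return
--
--         sep = separators[0]
--         pieces = text.split(sep)
--         new_pieces = []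
--
--         # Reconstruct chunks
--         current_chunk = ""
--         for piece in pieces:
--             if len(current_chunk) + len(piece) + len(sep) <= current_size:
--                 current_chunk += (sep + piece) if current_chunk else piece
--             else:
--                 if current_chunk:
--                     new_pieces.append(current_chunk)
--                 current_chunk = piece
--         if current_chunk:
--             new_pieces.append(current_chunk)
--
--         for piece in new_pieces:
--             if len(piece) <= current_size:
--                 final_chunks.append(piece)
--             else:
--                 split(piece, separators[1:], current_size)
--
--     split(text, separators, target_size)
--     return final_chunks
-- ===== SOURCE B (Python) =====
-- def _chunk_recursive(text: str, target_size=500) -> list[str]: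
--     # Iterative level-by-level refinement: one pass per separator over a flat
--     # worklist of segments, instead of recursion with a shared output list.
--     separators = ["\n\n", "\n", ". ", " ", ""]
--
--     def merge_split(s, sep):
--         pieces = s.split(sep)
--         out = []
--         cur = ""
--         for p in pieces:
--             if len(cur) + len(p) + len(sep) <= target_size:
--                 cur += (sep + p) if cur else p
--             else:
--                 if cur:
--                     out.append(cur)
--                 cur = p
--         if cur:
--             out.append(cur)
--         return out
--
--     segs = [text]
--     for sep in separators:
--         new_segs = []
--         for s in segs:
--             if len(s) <= target_size:
--                 new_segs.append(s)
--             else: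
--                 new_segs.extend(merge_split(s, sep))
--         segs = new_segs
--     return segs
-- ===== Notes on version B (the rewrite author's own statement) =====
-- stated objective: alternative
-- what changed: Replaces the recursion over separator suffixes with a shared closure output list (plus an unreachable hard-slice fallback) by an iterative level-by-level refinement: one pass per separator over a flat worklist of segments, keeping small segments and re-splitting big ones, returning the final worklist.
import Mathlib
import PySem

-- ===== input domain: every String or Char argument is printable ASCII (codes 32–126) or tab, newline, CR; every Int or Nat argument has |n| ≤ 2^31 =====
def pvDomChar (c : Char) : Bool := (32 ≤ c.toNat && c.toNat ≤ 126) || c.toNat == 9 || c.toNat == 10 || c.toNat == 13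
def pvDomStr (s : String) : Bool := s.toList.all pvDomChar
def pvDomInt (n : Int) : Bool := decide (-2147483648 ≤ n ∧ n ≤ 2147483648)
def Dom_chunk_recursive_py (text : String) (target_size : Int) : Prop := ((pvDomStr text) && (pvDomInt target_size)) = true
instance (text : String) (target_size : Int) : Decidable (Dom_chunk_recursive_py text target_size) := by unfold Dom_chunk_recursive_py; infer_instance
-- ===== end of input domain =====

-- B replaces A's recursion over separator suffixes (with a shared output list and a dead
-- hard-slice fallback) by an iterative pass per separator over a flat worklist of segments;
-- same chunking step and emit order.

-- ===== PORT A =====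
-- shared helper: the 'Reconstruct chunks' loop, identical in both Pythons
def pvMerge (size : Int) (sep : String) (ps : List String) : List String :=
  let st := ps.foldl (fun (st : List String × String) p =>
    if PySem.Str.len st.2 + PySem.Str.len p + PySem.Str.len sep ≤ size then
      (st.1, if st.2 == "" then p else st.2 ++ sep ++ p)
    else
      (if st.2 == "" then st.1 else st.1 ++ [st.2], p)) ([], "")
  if st.2 == "" then st.1 else st.1 ++ [st.2]

-- [text[i:i+current_size] for i in range(0, len(text), current_size)]
def pvHardSlice (size : Int) (t : String) : List String :=
  (PySem.List.pyRange 0 (PySem.Str.len t) size).map (fun i => PySem.Str.slice t (some i) (some (i + size)))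

-- A's inner 'split' procedure; 'acc' is the closure list final_chunks.
-- PySem.Str.split? is none exactly where Python's str.split raises ValueError (the empty
-- separator); that branch is unreachable under Pre_ and contributes nothing.
def pvSplitRec (size : Int) : List String → String → List String → List String
  | seps, t, acc =>
    if PySem.Str.len t ≤ size then acc ++ [t]
    else match seps with
      | [] => acc ++ pvHardSlice size t
      | sep :: rest =>
        match PySem.Str.split? t sep with
        | none => acc
        | some pieces =>
          (pvMerge size sep pieces).foldl
            (fun a p => if PySem.Str.len p ≤ size then a ++ [p] else pvSplitRec size rest p a) acc
  termination_by seps => seps.length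

def chunk_recursive_py (text : String) (target_size : Int) : List String :=
  pvSplitRec target_size ["\n\n", "\n", ". ", " ", ""] text []

-- ===== PORT B =====
-- B's merge_split helper: split then reconstruct (none = Python ValueError on the empty
-- separator, unreachable under Pre_)
def pvMergeSplitB (size : Int) (sep : String) (s : String) : List String :=
  match PySem.Str.split? s sep with
  | none => []
  | some ps => pvMerge size sep ps

def chunk_recursive_py_alt (text : String) (target_size : Int) : List String :=
  ["\n\n", "\n", ". ", " ", ""].foldl
    (fun segs sep => segs.foldl
      (fun acc s =>
        if PySem.Str.len s ≤ target_size then acc ++ [s]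
        else acc ++ pvMergeSplitB target_size sep s) [])
    [text]

-- ===== PRECONDITION & SPEC =====
def pvSp (t : String) (sep : String) : List String := (PySem.Str.split? t sep).getD [t]

-- Pre_ excludes exactly the inputs on which Python A raises ValueError: a nonempty
-- fragment that is still oversized after the last real separator pass reaches a split by
-- the empty separator (empty fragments never recurse, so they are admitted).
def Pre_chunk_recursive_py (text : String) (target_size : Int) : Prop :=
  PySem.Str.len text ≤ target_size ∨
  ∀ p1 ∈ pvSp text "\n\n", p1 = "" ∨ PySem.Str.len p1 ≤ target_size ∨
    ∀ p2 ∈ pvSp p1 "\n", p2 = "" ∨ PySem.Str.len p2 ≤ target_size ∨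
      ∀ p3 ∈ pvSp p2 ". ", p3 = "" ∨ PySem.Str.len p3 ≤ target_size ∨
        ∀ p4 ∈ pvSp p3 " ", p4 = "" ∨ PySem.Str.len p4 ≤ target_size
instance (text : String) (target_size : Int) : Decidable (Pre_chunk_recursive_py text target_size) := by
  unfold Pre_chunk_recursive_py; infer_instance

def pvWitness_chunk_recursive_py : String × Int := ("a b", 2)

def Spec_chunk_recursive_py (text : String) (target_size : Int) (out : List String) : Prop := out = chunk_recursive_py_alt text target_size
instance (text : String) (target_size : Int) (out : List String) : Decidable (Spec_chunk_recursive_py text target_size out) := by unfold Spec_chunk_recursive_py; infer_instance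

-- ===== CLAIM (what is proved, stated in full; the proofs are below) =====
def Claim_equal_chunk_recursive_py : Prop := ∀ (text : String) (target_size : Int), Dom_chunk_recursive_py text target_size → Pre_chunk_recursive_py text target_size → Spec_chunk_recursive_py text target_size (chunk_recursive_py text target_size)

-- ===== LEMMAS AND PROOFS =====

-- Characterisation of A: what 'split' appends for one piece, as a pure list.
def pvLA (size : Int) : List String → String → List String
  | [], t => if PySem.Str.len t ≤ size then [t] else pvHardSlice size t
  | sep :: rest, t =>
    if PySem.Str.len t ≤ size then [t]
    else match PySem.Str.split? t sep with
      | none => []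
      | some ps => (pvMerge size sep ps).flatMap
          (fun p => if PySem.Str.len p ≤ size then [p] else pvLA size rest p)

-- Characterisation of B: the refinement tree below one segment.
def pvBL (size : Int) : List String → String → List String
  | [], t => [t]
  | sep :: rest, t =>
    (if PySem.Str.len t ≤ size then [t] else pvMergeSplitB size sep t).flatMap (pvBL size rest)

theorem pvFoldlStep (c : String → Prop) [DecidablePred c] (g0 : String → List String) :
    ∀ (l : List String) (acc : List String),
      l.foldl (fun a p => if c p then a ++ [p] else a ++ g0 p) acc
        = acc ++ l.flatMap (fun p => if c p then [p] else g0 p) := by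
  intro l
  induction l with
  | nil => simp
  | cons p l ih =>
    intro acc
    by_cases h : c p <;> simp [h, ih]

theorem pvSplitRec_eq (size : Int) :
    ∀ (seps : List String) (t : String) (acc : List String),
      pvSplitRec size seps t acc = acc ++ pvLA size seps t := by
  intro seps
  induction seps with
  | nil =>
    intro t acc
    rw [pvSplitRec]
    by_cases h : PySem.Str.len t ≤ size <;>
      simp only [PySem.Str.len_eq, String.length_toList] at h <;> simp [pvLA, h]
  | cons sep rest ih =>
    intro t acc
    rw [pvSplitRec]
    by_cases h : PySem.Str.len t ≤ size
    · have h' := h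
      simp only [PySem.Str.len_eq, String.length_toList] at h'
      simp [pvLA, h']
    · have h' := h
      simp only [PySem.Str.len_eq, String.length_toList] at h'
      simp only [pvLA, PySem.Str.len_eq, String.length_toList, if_neg h']
      cases hs : PySem.Str.split? t sep with
      | none => simp
      | some ps =>
        simp only []
        rw [PySem.List.foldl_congr_mem _ _
            (fun a p => if (p.length : Int) ≤ size then a ++ [p] else a ++ pvLA size rest p) _
            (by intro a p _; by_cases hp : (p.length : Int) ≤ size <;> simp [hp, ih])]
        rw [pvFoldlStep (fun p => (p.length : Int) ≤ size) (pvLA size rest)]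

theorem pvBL_small (size : Int) :
    ∀ (seps : List String) (t : String), PySem.Str.len t ≤ size → pvBL size seps t = [t] := by
  intro seps
  induction seps with
  | nil => intro t _; rfl
  | cons sep rest ih =>
    intro t h
    have h' := h
    simp only [PySem.Str.len_eq, String.length_toList] at h'
    simp [pvBL, h', ih t h]

-- B's whole double loop, characterised by pvBL.
theorem pvAltLevels (size : Int) :
    ∀ (seps : List String) (segs : List String),
      seps.foldl
        (fun segs sep => segs.foldl
          (fun acc s =>
            if PySem.Str.len s ≤ size then acc ++ [s]
            else acc ++ pvMergeSplitB size sep s) [])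
        segs
      = segs.flatMap (pvBL size seps) := by
  intro seps
  induction seps with
  | nil => intro segs; simp [pvBL]
  | cons sep rest ih =>
    intro segs
    simp only [List.foldl_cons]
    rw [show (segs.foldl
        (fun acc s =>
          if PySem.Str.len s ≤ size then acc ++ [s]
          else acc ++ pvMergeSplitB size sep s) [])
      = segs.flatMap (fun s => if PySem.Str.len s ≤ size then [s] else pvMergeSplitB size sep s) by
        rw [pvFoldlStep (fun s => PySem.Str.len s ≤ size) (pvMergeSplitB size sep)]
        simp]
    rw [ih, List.flatMap_assoc]
    rfl

theorem pvSplitEmpty (t : String) : PySem.Str.split? t "" = none := rfl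

theorem pvMain (size : Int) :
    ∀ (seps : List String) (t : String),
      pvLA size (seps ++ [""]) t = pvBL size (seps ++ [""]) t := by
  intro seps
  induction seps with
  | nil =>
    intro t
    by_cases h : PySem.Str.len t ≤ size <;>
      simp only [PySem.Str.len_eq, String.length_toList] at h <;>
      simp [pvLA, pvBL, pvMergeSplitB, pvSplitEmpty, h]
  | cons sep rest ih =>
    intro t
    by_cases h : PySem.Str.len t ≤ size
    · have h' := h
      simp only [PySem.Str.len_eq, String.length_toList] at h'
      simp only [List.cons_append, pvLA, pvBL, PySem.Str.len_eq, String.length_toList,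
        if_pos h']
      rw [List.flatMap_singleton, pvBL_small size (rest ++ [""]) t h]
    · have h' := h
      simp only [PySem.Str.len_eq, String.length_toList] at h'
      simp only [List.cons_append, pvLA, pvBL, PySem.Str.len_eq, String.length_toList,
        if_neg h']
      cases hs : PySem.Str.split? t sep with
      | none => simp [pvMergeSplitB, hs]
      | some ps =>
        simp only [pvMergeSplitB, hs]
        apply List.flatMap_congr
        intro p _
        by_cases hp : PySem.Str.len p ≤ size
        · have hp' := hp
          simp only [PySem.Str.len_eq, String.length_toList] at hp'
          rw [if_pos hp', pvBL_small size (rest ++ [""]) p hp]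
        · have hp' := hp
          simp only [PySem.Str.len_eq, String.length_toList] at hp'
          rw [if_neg hp']
          exact ih p

-- ===== VERDICT (by name: the statement is the Claim_ definition above) =====
theorem chunk_recursive_py_spec : Claim_equal_chunk_recursive_py := by
  intro text target_size _ _
  unfold Spec_chunk_recursive_py chunk_recursive_py chunk_recursive_py_alt
  rw [pvSplitRec_eq, pvAltLevels]
  show pvLA target_size (["\n\n", "\n", ". ", " "] ++ [""]) text
      = [text].flatMap (pvBL target_size (["\n\n", "\n", ". ", " "] ++ [""]))
  rw [List.flatMap_singleton, pvMain]
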